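-- pv_equiv track=rewrite | github.com/yasheshak/Permutation-For-Overlaps | Yashesha_Kothari_Tier2.py | calculate_overlap
-- ===== SOURCE A (Python) =====
-- def merge_intervals(intervals):
--     """Merge overlapping intervals within a set of intervals on the same chromosome."""
--     if not intervals:
--         return []
--
--     # Sort intervals by start position only (chromosome is implied by structure)
--     intervals = sorted(intervals, key=lambda x: x[0])
--
--     merged = []
--     current_start, current_end = intervals[0] #initialize start and end for merging
--
--     #iterate through the rest of the intervals
--     for i in range(1, len(intervals)):
--         start, end = intervals[i]
--
--         #If intervals overlap/touch, merge them
--         if start <= current_end: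
--             current_end = max(current_end, end) #merge by extending the end to the max of the two
--         else:
--             # If they don't overlap, add the current interval to the merged list
--             merged.append((current_start, current_end))
--             current_start, current_end = start, end #move on to the next interval
--
--     # Add the last interval after the loop
--     merged.append((current_start, current_end))
--
--     return merged
--
-- def calculate_overlap(set_a, set_b):
--     """Calculate the number of overlapping bases between two sets of merged ranges.
--     Takes two sets of intervals set_a and set_b, for each chromosome (chromo, start, end),
--     merges any overlapping intervals within each set and calculates the total number of bases where they overlap.
--     """
--     overlap = 0
--
--     # Iterate over chromosomes in set_a
--     for chrom in set_a:
--         if chrom not in set_b: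
--             continue #if chrom not in set_b, skip it
--
--         # Merge intervals within each set for the current chromosome
--         set_a_merged = merge_intervals(set_a[chrom])
--         set_b_merged = merge_intervals(set_b[chrom])
--
--         i, j = 0, 0 #initialize pointers for both sets of merged intervals
--
--         #Loop through both sets of merged intervals for the chromosome
--         while i < len(set_a_merged) and j < len(set_b_merged):
--             start_a, end_a = set_a_merged[i] #extract start, end for current intervals in both
--             start_b, end_b = set_b_merged[j]
--
--             if end_a <= start_b:
--                 i += 1 #if interval A ends before B starts, move to next in A
--             elif end_b <= start_a:
--                 j += 1 #if interval B ends before A starts, move to next in B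
--             else:
--                 # There is an overlap and calculate number of bases overlapped
--                 overlap += max(0, min(end_a, end_b) - max(start_a, start_b))
--
--                 # Move the interval with the smallest end
--                 if end_a < end_b:
--                     i += 1 #interval A finishes first, move to the next in set A
--                 else:
--                     j += 1 #interval B finishes first, move to next in set B
--
--     return overlap
-- ===== SOURCE B (Python) =====
-- def _merged(intervals):
--     """Coalesce intervals sorted by start, extending the last open block in place."""
--     out = []
--     for s, e in sorted(intervals, key=lambda x: x[0]):
--         if out and s <= out[-1][1]:
--             out[-1] = (out[-1][0], max(out[-1][1], e))
--         else:
--             out.append((s, e))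
--     return out
--
--
-- def calculate_overlap(set_a, set_b):
--     total = 0
--     for chrom in set_a:
--         if chrom in set_b:
--             merged_b = _merged(set_b[chrom])
--             for sa, ea in _merged(set_a[chrom]):
--                 for sb, eb in merged_b:
--                     gain = min(ea, eb) - max(sa, sb)
--                     if gain > 0:
--                         total += gain
--     return total
-- ===== Notes on version B (the rewrite author's own statement) =====
-- stated objective: alternative
-- what changed: Replaces A's two-pointer walk over the two merged interval lists by a brute-force sum of clamped pairwise intersections over all merged-block pairs, and coalesces intervals by extending the last emitted block in place instead of carrying a current_start/current_end accumulator with a final flush.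
import Mathlib
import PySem

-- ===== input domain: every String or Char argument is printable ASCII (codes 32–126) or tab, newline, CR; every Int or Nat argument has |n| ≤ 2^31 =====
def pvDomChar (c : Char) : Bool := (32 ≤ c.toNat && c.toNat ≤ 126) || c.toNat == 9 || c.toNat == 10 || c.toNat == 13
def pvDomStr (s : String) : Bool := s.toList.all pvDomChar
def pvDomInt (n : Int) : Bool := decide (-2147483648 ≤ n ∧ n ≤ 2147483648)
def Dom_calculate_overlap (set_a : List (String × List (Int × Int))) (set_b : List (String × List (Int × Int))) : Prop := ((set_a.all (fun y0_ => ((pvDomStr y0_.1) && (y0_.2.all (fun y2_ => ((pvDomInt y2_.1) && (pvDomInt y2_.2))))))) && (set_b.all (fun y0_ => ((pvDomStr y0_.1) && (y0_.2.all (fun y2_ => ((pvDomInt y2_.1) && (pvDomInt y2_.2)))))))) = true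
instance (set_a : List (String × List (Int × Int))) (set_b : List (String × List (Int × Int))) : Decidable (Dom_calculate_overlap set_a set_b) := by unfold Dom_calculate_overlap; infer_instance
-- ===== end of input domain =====

-- B replaces A's two-pointer walk over the merged interval lists by a brute-force
-- sum of clamped pairwise intersections (and coalesces intervals by extending the
-- last emitted block instead of carrying a current_start/current_end accumulator):
-- an alternative decomposition, not claimed faster.

-- ===== PORT A =====
-- the loop of merge_intervals: state (current_start, current_end, merged)
def mergeGo : List (Int × Int) → Int → Int → List (Int × Int) → List (Int × Int)
  | [], cs, ce, merged => merged ++ [(cs, ce)]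
  | (s, e) :: t, cs, ce, merged =>
    if s ≤ ce then mergeGo t cs (max ce e) merged
    else mergeGo t s e (merged ++ [(cs, ce)])

def merge_intervals (intervals : List (Int × Int)) : List (Int × Int) :=
  match PySem.List.sorted intervals (fun x => x.1) false with
  | [] => []                      -- also covers Python's `if not intervals: return []`
  | (cs, ce) :: rest => mergeGo rest cs ce []

-- the two-pointer while loop, as recursion on the two suffixes
def tpLoop : List (Int × Int) → List (Int × Int) → Int → Int
  | (sa, ea) :: A', (sb, eb) :: B', acc =>
    if ea ≤ sb then tpLoop A' ((sb, eb) :: B') acc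
    else if eb ≤ sa then tpLoop ((sa, ea) :: A') B' acc
    else
      let acc' := acc + max 0 (min ea eb - max sa sb)
      if ea < eb then tpLoop A' ((sb, eb) :: B') acc' else tpLoop ((sa, ea) :: A') B' acc'
  | _, _, acc => acc

def calculate_overlap (set_a : List (String × List (Int × Int))) (set_b : List (String × List (Int × Int))) : Int :=
  set_a.foldl (fun overlap p =>
    match List.lookup p.1 set_b with
    | none => overlap          -- chrom not in set_b: continue
    | some lb =>
      tpLoop (merge_intervals ((List.lookup p.1 set_a).getD []))
             (merge_intervals lb) overlap) 0

-- ===== PORT B =====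
-- coalescing step: extend the last emitted block in place (list kept reversed, newest first)
def mergeStep (out : List (Int × Int)) (iv : Int × Int) : List (Int × Int) :=
  match out with
  | [] => [iv]
  | (cs, ce) :: t => if iv.1 ≤ ce then (cs, max ce iv.2) :: t else iv :: (cs, ce) :: t

def merged_alt (intervals : List (Int × Int)) : List (Int × Int) :=
  ((PySem.List.sorted intervals (fun x => x.1) false).foldl mergeStep []).reverse

-- brute-force pairwise clamped intersection sum
def pairSum (la lb : List (Int × Int)) : Int :=
  la.foldl (fun t a =>
    lb.foldl (fun t b =>
      let gain := min a.2 b.2 - max a.1 b.1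
      if gain > 0 then t + gain else t) t) 0

def calculate_overlap_alt (set_a : List (String × List (Int × Int))) (set_b : List (String × List (Int × Int))) : Int :=
  set_a.foldl (fun total p =>
    match List.lookup p.1 set_b with
    | none => total
    | some lb =>
      total + pairSum (merged_alt ((List.lookup p.1 set_a).getD []))
                      (merged_alt lb)) 0

-- ===== PRECONDITION & SPEC =====
def Spec_calculate_overlap (set_a : List (String × List (Int × Int))) (set_b : List (String × List (Int × Int))) (out : Int) : Prop := out = calculate_overlap_alt set_a set_b
instance (set_a : List (String × List (Int × Int))) (set_b : List (String × List (Int × Int))) (out : Int) : Decidable (Spec_calculate_overlap set_a set_b out) := by unfold Spec_calculate_overlap; infer_instance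

-- ===== CLAIM (what is proved, stated in full; the proofs are below) =====
def Claim_equal_calculate_overlap : Prop := ∀ (set_a : List (String × List (Int × Int))) (set_b : List (String × List (Int × Int))), Dom_calculate_overlap set_a set_b → Spec_calculate_overlap set_a set_b (calculate_overlap set_a set_b)

-- ===== LEMMAS AND PROOFS =====

-- contribution of one pair, and its row/total sums
def contrib (a b : Int × Int) : Int := max 0 (min a.2 b.2 - max a.1 b.1)

def rowSum (a : Int × Int) (lb : List (Int × Int)) : Int := (lb.map (contrib a)).sum

def dsum (la lb : List (Int × Int)) : Int := (la.map (fun a => rowSum a lb)).sum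

-- merged lists are start-sorted with a strict gap between consecutive blocks
def GoodRel (p q : Int × Int) : Prop := p.1 ≤ q.1 ∧ p.2 < q.1

def Good (l : List (Int × Int)) : Prop := l.Pairwise GoodRel

-- ---- B's fold equals dsum ----
lemma inner_foldl_eq (a : Int × Int) (lb : List (Int × Int)) (t : Int) :
    lb.foldl (fun t b =>
      let gain := min a.2 b.2 - max a.1 b.1
      if gain > 0 then t + gain else t) t = t + rowSum a lb := by
  induction lb generalizing t with
  | nil => simp [rowSum]
  | cons b lb ih =>
    simp only [List.foldl_cons, ih, rowSum, List.map_cons, List.sum_cons, contrib]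
    split_ifs with h <;> omega

lemma pairSum_eq_dsum (la lb : List (Int × Int)) : pairSum la lb = dsum la lb := by
  have h : ∀ t, la.foldl (fun t a =>
      lb.foldl (fun t b =>
        let gain := min a.2 b.2 - max a.1 b.1
        if gain > 0 then t + gain else t) t) t = t + dsum la lb := by
    induction la with
    | nil => simp [dsum]
    | cons a la ih =>
      intro t
      rw [List.foldl_cons, inner_foldl_eq, ih]
      simp only [dsum, List.map_cons, List.sum_cons]
      omega
  simpa [pairSum] using h 0

-- ---- B's merge equals A's merge ----
lemma mergeGo_append (t : List (Int × Int)) (cs ce : Int) (merged : List (Int × Int)) :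
    mergeGo t cs ce merged = merged ++ mergeGo t cs ce [] := by
  induction t generalizing cs ce merged with
  | nil => simp [mergeGo]
  | cons x t ih =>
    obtain ⟨s, e⟩ := x
    simp only [mergeGo, List.nil_append]
    split_ifs with h
    · exact ih _ _ _
    · rw [ih s e (merged ++ [(cs, ce)]), ih s e [(cs, ce)]]
      simp

lemma foldl_mergeStep_reverse (t : List (Int × Int)) (cs ce : Int) (rest : List (Int × Int)) :
    (t.foldl mergeStep ((cs, ce) :: rest)).reverse = rest.reverse ++ mergeGo t cs ce [] := by
  induction t generalizing cs ce rest with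
  | nil => simp [mergeGo]
  | cons x t ih =>
    obtain ⟨s, e⟩ := x
    simp only [List.foldl_cons, mergeStep, mergeGo, List.nil_append]
    split_ifs with h
    · exact ih _ _ _
    · rw [ih s e ((cs, ce) :: rest), mergeGo_append t s e [(cs, ce)]]
      simp

lemma merged_alt_eq (intervals : List (Int × Int)) :
    merged_alt intervals = merge_intervals intervals := by
  unfold merged_alt merge_intervals
  cases h : PySem.List.sorted intervals (fun x => x.1) false with
  | nil => simp
  | cons x rest =>
    obtain ⟨cs, ce⟩ := x
    simp only [List.foldl_cons, mergeStep]
    simpa using foldl_mergeStep_reverse rest cs ce []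

-- ---- merged lists are Good ----
lemma starts_le_mergeGo (t : List (Int × Int)) (cs ce : Int)
    (hs : List.Pairwise (fun a b => a.1 ≤ b.1) ((cs, ce) :: t)) :
    ∀ y ∈ mergeGo t cs ce [], cs ≤ y.1 := by
  induction t generalizing cs ce with
  | nil => intro y hy; simp [mergeGo] at hy; subst hy; rfl
  | cons x t ih =>
    obtain ⟨s, e⟩ := x
    rw [List.pairwise_cons] at hs
    obtain ⟨hcs, hst⟩ := hs
    intro y hy
    simp only [mergeGo, List.nil_append] at hy
    split_ifs at hy with h
    · refine ih cs (max ce e) ?_ y hy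
      exact List.pairwise_cons.mpr ⟨fun b hb => hcs b (List.mem_cons_of_mem _ hb),
        (List.pairwise_cons.mp hst).2⟩
    · rw [mergeGo_append] at hy
      rcases List.mem_append.mp hy with hy | hy
      · simp at hy; subst hy; rfl
      · exact le_trans (hcs (s, e) List.mem_cons_self) (ih s e hst y hy)

lemma pairwise_mergeGo (t : List (Int × Int)) (cs ce : Int)
    (hs : List.Pairwise (fun a b => a.1 ≤ b.1) ((cs, ce) :: t)) :
    (mergeGo t cs ce []).Pairwise GoodRel := by
  induction t generalizing cs ce with
  | nil => simp [mergeGo]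
  | cons x t ih =>
    obtain ⟨s, e⟩ := x
    rw [List.pairwise_cons] at hs
    obtain ⟨hcs, hst⟩ := hs
    simp only [mergeGo, List.nil_append]
    split_ifs with h
    · exact ih cs (max ce e) (List.pairwise_cons.mpr
        ⟨fun b hb => hcs b (List.mem_cons_of_mem _ hb), (List.pairwise_cons.mp hst).2⟩)
    · rw [mergeGo_append]
      refine List.pairwise_append.mpr ⟨List.pairwise_singleton _ _, ih s e hst, ?_⟩
      intro p hp y hy
      simp at hp; subst hp
      have hys : s ≤ y.1 := starts_le_mergeGo t s e hst y hy
      exact ⟨le_trans (hcs (s, e) List.mem_cons_self) hys,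
        lt_of_lt_of_le (not_le.mp h) hys⟩

lemma good_merge (intervals : List (Int × Int)) : Good (merge_intervals intervals) := by
  unfold merge_intervals
  cases h : PySem.List.sorted intervals (fun x => x.1) false with
  | nil => exact List.Pairwise.nil
  | cons x rest =>
    obtain ⟨cs, ce⟩ := x
    have hp : ((cs, ce) :: rest).Pairwise (fun a b => a.1 ≤ b.1) := by
      rw [← h]; exact PySem.List.sorted_pairwise intervals (fun x => x.1)
    exact pairwise_mergeGo rest cs ce hp

-- ---- column extraction for dsum ----
lemma dsum_cons_right (la : List (Int × Int)) (b : Int × Int) (lb : List (Int × Int)) :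
    dsum la (b :: lb) = (la.map (fun a => contrib a b)).sum + dsum la lb := by
  induction la with
  | nil => simp [dsum]
  | cons a la ih =>
    simp only [dsum, List.map_cons, List.sum_cons, rowSum] at *
    omega

-- ---- the two-pointer loop equals dsum on Good lists ----
lemma tpLoop_eq_dsum (la lb : List (Int × Int)) (acc : Int)
    (ha : Good la) (hb : Good lb) : tpLoop la lb acc = acc + dsum la lb := by
  induction la, lb, acc using tpLoop.induct with
  | case5 la lb acc h =>
    match la, lb, h with
    | [], lb, _ => simp [tpLoop, dsum]
    | (x :: xs), [], _ => simp [tpLoop, dsum, rowSum]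
    | (x :: xs), (y :: ys), h => exact absurd (h x.1 x.2 xs y.1 y.2 ys (by simp) (by simp)) (fun f => f)
  | case1 sa ea A' sb eb B' acc h ih =>
    -- ea ≤ sb : skip the a-interval; its whole row over (sb,eb)::B' is 0
    rw [Good, List.pairwise_cons] at ha
    have hrow : rowSum (sa, ea) ((sb, eb) :: B') = 0 := by
      rw [rowSum, List.sum_eq_zero]
      intro x hx
      obtain ⟨bb, hbmem, rfl⟩ := List.mem_map.mp hx
      rcases List.mem_cons.mp hbmem with rfl | hbm
      · simp only [contrib]; omega
      · have := (List.pairwise_cons.mp hb).1 bb hbm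
        simp only [contrib, GoodRel] at *
        omega
    rw [tpLoop, if_pos h, ih ha.2 hb]
    simp only [dsum, List.map_cons, List.sum_cons, hrow]
    omega
  | case2 sa ea A' sb eb B' acc h1 h2 ih =>
    -- eb ≤ sa : drop the b-interval; its whole column over (sa,ea)::A' is 0
    rw [Good, List.pairwise_cons] at hb
    have hcol : (((sa, ea) :: A').map (fun a => contrib a (sb, eb))).sum = 0 := by
      rw [List.sum_eq_zero]
      intro x hx
      obtain ⟨aa, hamem, rfl⟩ := List.mem_map.mp hx
      rcases List.mem_cons.mp hamem with rfl | ham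
      · simp only [contrib]; omega
      · have := (List.pairwise_cons.mp ha).1 aa ham
        simp only [contrib, GoodRel] at *
        omega
    rw [tpLoop, if_neg h1, if_pos h2, ih ha hb.2, dsum_cons_right, hcol]
    omega
  | case3 sa ea A' sb eb B' acc h1 h2 accp h3 ih =>
    -- overlap, ea < eb : count the pair, retire the a-interval; the rest of its row is 0
    rw [Good, List.pairwise_cons] at ha
    have hrow : rowSum (sa, ea) B' = 0 := by
      rw [rowSum, List.sum_eq_zero]
      intro x hx
      obtain ⟨bb, hbmem, rfl⟩ := List.mem_map.mp hx
      have := (List.pairwise_cons.mp hb).1 bb hbmem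
      simp only [contrib, GoodRel] at *
      omega
    rw [tpLoop, if_neg h1, if_neg h2]
    simp only [if_pos h3]
    rw [ih ha.2 hb]
    simp only [dsum, List.map_cons, List.sum_cons, rowSum, List.map_cons, List.sum_cons] at *
    simp only [contrib] at *
    omega
  | case4 sa ea A' sb eb B' acc h1 h2 accp h3 ih =>
    -- overlap, eb ≤ ea : count the pair, retire the b-interval; the rest of its column is 0
    rw [Good, List.pairwise_cons] at hb
    have hcol : (A'.map (fun a => contrib a (sb, eb))).sum = 0 := by
      rw [List.sum_eq_zero]
      intro x hx
      obtain ⟨aa, hamem, rfl⟩ := List.mem_map.mp hx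
      have := (List.pairwise_cons.mp ha).1 aa hamem
      simp only [contrib, GoodRel] at *
      omega
    rw [tpLoop, if_neg h1, if_neg h2]
    simp only [if_neg h3]
    rw [ih ha hb.2, dsum_cons_right]
    simp only [List.map_cons, List.sum_cons, contrib] at *
    omega

-- per-chromosome equality
lemma perChrom (la lb : List (Int × Int)) (acc : Int) :
    tpLoop (merge_intervals la) (merge_intervals lb) acc
      = acc + pairSum (merged_alt la) (merged_alt lb) := by
  rw [merged_alt_eq, merged_alt_eq, pairSum_eq_dsum]
  exact tpLoop_eq_dsum _ _ acc (good_merge la) (good_merge lb)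

-- ===== VERDICT (by name: the statement is the Claim_ definition above) =====
theorem calculate_overlap_spec : Claim_equal_calculate_overlap := by
  intro set_a set_b _
  unfold Spec_calculate_overlap calculate_overlap calculate_overlap_alt
  apply List.foldl_ext
  intro acc p _
  cases h : List.lookup p.1 set_b with
  | none => rfl
  | some lb => exact perChrom _ lb acc
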